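-- pv_equiv track=rewrite | github.com/dkutelov/softuni-study | python/softuni-python-advanced/Exam prep/08-Apr/02_easter_bunny.py | get_bunny_position
-- ===== SOURCE A (Python) =====
-- def get_bunny_position(matrix):
--     """ Returns bunny position and turns to numbers all eggs numbers"""
--     bunny_pos = []
--     size = len(matrix)
--     for i in range(size):
--         for j in range(size):
--             if matrix[i][j].upper() == 'B':
--                 bunny_pos = [i,j]
--             elif matrix[i][j].upper() == 'X':
--                 pass
--             else:
--                 matrix[i][j] = int(matrix[i][j])
--     return bunny_pos
-- ===== SOURCE B (Python) =====
-- def _find_bunny(matrix, size):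
--     for i in reversed(range(size)):
--         for j in reversed(range(size)):
--             if matrix[i][j].upper() == 'B':
--                 return [i, j]
--     return []
--
--
-- def get_bunny_position(matrix):
--     """Two passes: find the last bunny (first in reverse row-major order,
--     early return), then convert egg cells to int in place."""
--     size = len(matrix)
--     pos = _find_bunny(matrix, size)
--     for i in range(size):
--         for j in range(size):
--             u = matrix[i][j].upper()
--             if u != 'B' and u != 'X':
--                 matrix[i][j] = int(matrix[i][j])
--     return pos
-- ===== Notes on version B (the rewrite author's own statement) =====
-- stated objective: simpler
-- what changed: Replaces the fused last-match-wins forward scan with two separate passes: a reversed row-major scan that early-returns at the first bunny found, and an independent in-place int-conversion pass; the conversion no longer threads through the search.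
import Mathlib
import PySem

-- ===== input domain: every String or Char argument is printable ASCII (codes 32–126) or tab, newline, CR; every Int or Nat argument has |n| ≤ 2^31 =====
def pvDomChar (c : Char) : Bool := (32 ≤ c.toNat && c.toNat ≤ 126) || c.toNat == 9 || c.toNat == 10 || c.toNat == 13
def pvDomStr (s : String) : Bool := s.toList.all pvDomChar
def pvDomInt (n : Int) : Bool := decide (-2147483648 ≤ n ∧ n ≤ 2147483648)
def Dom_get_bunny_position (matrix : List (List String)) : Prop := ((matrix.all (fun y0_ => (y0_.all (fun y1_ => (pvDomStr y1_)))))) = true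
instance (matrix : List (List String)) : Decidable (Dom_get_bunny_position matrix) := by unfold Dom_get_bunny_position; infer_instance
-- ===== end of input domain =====

-- B splits A's fused last-match-wins scan into a reversed early-return bunny search plus a separate
-- in-place int-conversion pass (same cells, same values mutated); equivalence is about the return value.


-- ===== PORT A =====
-- Literal transliteration of A. The 'else' branch ('matrix[i][j] = int(matrix[i][j])') only mutates
-- the matrix — each cell is read before its own write, so it never affects the returned value; its
-- ValueError (and IndexError on short rows) is excluded by Pre_.
def get_bunny_position (matrix : List (List String)) : List Int :=
  -- size = len(matrix)
  (PySem.List.pyRange 0 (PySem.List.len matrix) 1).foldl (fun bunny_pos i =>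
    (PySem.List.pyRange 0 (PySem.List.len matrix) 1).foldl (fun bunny_pos j =>
      match (PySem.List.pyGet? matrix i).bind (fun row => PySem.List.pyGet? row j) with
      | none => bunny_pos      -- IndexError: excluded by Pre_
      | some s =>
        if PySem.Str.upper s = "B" then [i, j]
        else if PySem.Str.upper s = "X" then bunny_pos
        else bunny_pos         -- in-place int conversion: mutation only, ValueError excluded by Pre_
    ) bunny_pos) []

-- ===== PORT B =====
-- B-side helper: reversed row-major scan, early return at the first bunny.
def pvFindBunny (matrix : List (List String)) (size : Int) : List Int :=
  (((PySem.List.pyRange 0 size 1).reverse).findSome? (fun i =>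
    ((PySem.List.pyRange 0 size 1).reverse).findSome? (fun j =>
      match (PySem.List.pyGet? matrix i).bind (fun row => PySem.List.pyGet? row j) with
      | none => none           -- IndexError: excluded by Pre_
      | some s => if PySem.Str.upper s = "B" then some [i, j] else none))).getD []

def get_bunny_position_alt (matrix : List (List String)) : List Int :=
  -- B's second pass converts egg cells to int in place (same mutation as A); it does not touch the
  -- returned value, and its ValueError/IndexError cases are excluded by Pre_.
  pvFindBunny matrix (PySem.List.len matrix)

-- ===== PRECONDITION & SPEC =====
-- Pre_ = exactly the inputs on which the Python A returns: every row of the size×size square is long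
-- enough (else IndexError) and every cell in it whose upper() is neither 'B' nor 'X' parses as int
-- (else ValueError).
def Pre_get_bunny_position (matrix : List (List String)) : Prop :=
  ∀ row ∈ matrix, matrix.length ≤ row.length ∧
    ∀ s ∈ row.take matrix.length,
      PySem.Str.upper s ≠ "B" → PySem.Str.upper s ≠ "X" → PySem.Int.ofStr? s ≠ none
instance (matrix : List (List String)) : Decidable (Pre_get_bunny_position matrix) := by
  unfold Pre_get_bunny_position; infer_instance

def pvWitness_get_bunny_position : List (List String) := [["b", "X"], ["12", "x"]]

def Spec_get_bunny_position (matrix : List (List String)) (out : List Int) : Prop := out = get_bunny_position_alt matrix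
instance (matrix : List (List String)) (out : List Int) : Decidable (Spec_get_bunny_position matrix out) := by unfold Spec_get_bunny_position; infer_instance

-- ===== CLAIM (what is proved, stated in full; the proofs are below) =====
def Claim_equal_get_bunny_position : Prop := ∀ (matrix : List (List String)), Dom_get_bunny_position matrix → Pre_get_bunny_position matrix → Spec_get_bunny_position matrix (get_bunny_position matrix)

-- ===== LEMMAS AND PROOFS =====

-- A last-match-wins forward fold is the first match of the reversed list.
theorem foldl_getD_eq_findSome_reverse {α β : Type} (g : α → Option β) :
    ∀ (l : List α) (init : β),
      l.foldl (fun acc x => (g x).getD acc) init = (l.reverse.findSome? g).getD init := by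
  intro l
  induction l with
  | nil => intro init; rfl
  | cons x xs ih =>
    intro init
    simp only [List.foldl_cons, List.reverse_cons, List.findSome?_append, ih]
    cases hx : xs.reverse.findSome? g <;> cases hg : g x <;> simp [hg, List.findSome?]

theorem innerA_eq (matrix : List (List String)) (i : Int) (acc : List Int) :
    (PySem.List.pyRange 0 (PySem.List.len matrix) 1).foldl (fun bunny_pos j =>
      match (PySem.List.pyGet? matrix i).bind (fun row => PySem.List.pyGet? row j) with
      | none => bunny_pos
      | some s =>
        if PySem.Str.upper s = "B" then [i, j]
        else if PySem.Str.upper s = "X" then bunny_pos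
        else bunny_pos) acc
    = (((PySem.List.pyRange 0 (PySem.List.len matrix) 1).reverse).findSome? (fun j =>
      match (PySem.List.pyGet? matrix i).bind (fun row => PySem.List.pyGet? row j) with
      | none => none
      | some s => if PySem.Str.upper s = "B" then some [i, j] else none)).getD acc := by
  have hfun : (fun (bunny_pos : List Int) (j : Int) =>
      match (PySem.List.pyGet? matrix i).bind (fun row => PySem.List.pyGet? row j) with
      | none => bunny_pos
      | some s =>
        if PySem.Str.upper s = "B" then [i, j]
        else if PySem.Str.upper s = "X" then bunny_pos
        else bunny_pos)
      = (fun (bunny_pos : List Int) (j : Int) =>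
        ((fun j => match (PySem.List.pyGet? matrix i).bind (fun row => PySem.List.pyGet? row j) with
          | none => none
          | some s => if PySem.Str.upper s = "B" then some [i, j] else none) j).getD bunny_pos) := by
    funext acc j
    cases h : (PySem.List.pyGet? matrix i).bind (fun row => PySem.List.pyGet? row j) with
    | none => simp [h]
    | some s =>
        simp only [h]
        by_cases hb : PySem.Str.upper s = "B" <;> by_cases hx : PySem.Str.upper s = "X" <;>
          simp [hb, hx]
  rw [hfun, foldl_getD_eq_findSome_reverse]

-- ===== VERDICT (by name: the statement is the Claim_ definition above) =====
theorem get_bunny_position_spec : Claim_equal_get_bunny_position := by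
  intro matrix _ _
  show _ = _
  unfold get_bunny_position get_bunny_position_alt pvFindBunny
  have hfun : (fun (bunny_pos : List Int) (i : Int) =>
      (PySem.List.pyRange 0 (PySem.List.len matrix) 1).foldl (fun bunny_pos j =>
        match (PySem.List.pyGet? matrix i).bind (fun row => PySem.List.pyGet? row j) with
        | none => bunny_pos
        | some s =>
          if PySem.Str.upper s = "B" then [i, j]
          else if PySem.Str.upper s = "X" then bunny_pos
          else bunny_pos) bunny_pos)
      = (fun (bunny_pos : List Int) (i : Int) =>
        ((fun i => ((PySem.List.pyRange 0 (PySem.List.len matrix) 1).reverse).findSome? (fun j =>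
          match (PySem.List.pyGet? matrix i).bind (fun row => PySem.List.pyGet? row j) with
          | none => none
          | some s => if PySem.Str.upper s = "B" then some [i, j] else none)) i).getD bunny_pos) := by
    funext acc i
    exact innerA_eq matrix i acc
  rw [hfun, foldl_getD_eq_findSome_reverse]
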